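-- pv_equiv track=rewrite | github.com/Jintao-Huang/leetcode_notebook | python/2 labuladong的算法小抄/1 核心套路篇/1.3 恢复BST[99].py | find2num
-- ===== SOURCE A (Python) =====
-- from typing import List, Dict, Optional
--
-- def find2num(nums: List[int]) -> List[int]:
--     # 找最左逆序, 最右逆序
--     xi, yi = -1, -1
--     for i in range(0, len(nums) - 1):
--         if nums[i] > nums[i + 1]:
--             if xi == -1:
--                 xi = i
--             yi = i + 1
--     return [xi, yi]
-- ===== SOURCE B (Python) =====
-- from typing import List
--
-- def find2num(nums: List[int]) -> List[int]:
--     # two directed scans with early exit: first inversion forward, last inversion backward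
--     n = len(nums)
--     xi = -1
--     for i in range(n - 1):
--         if nums[i] > nums[i + 1]:
--             xi = i
--             break
--     yi = -1
--     for i in range(n - 2, -1, -1):
--         if nums[i] > nums[i + 1]:
--             yi = i + 1
--             break
--     return [xi, yi]
-- ===== Notes on version B (the rewrite author's own statement) =====
-- stated objective: alternative
-- what changed: Replaces A's single full pass maintaining both extremes with two independent directed scans that each stop at the first inversion found (forward for xi, backward for yi).
import Mathlib
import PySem

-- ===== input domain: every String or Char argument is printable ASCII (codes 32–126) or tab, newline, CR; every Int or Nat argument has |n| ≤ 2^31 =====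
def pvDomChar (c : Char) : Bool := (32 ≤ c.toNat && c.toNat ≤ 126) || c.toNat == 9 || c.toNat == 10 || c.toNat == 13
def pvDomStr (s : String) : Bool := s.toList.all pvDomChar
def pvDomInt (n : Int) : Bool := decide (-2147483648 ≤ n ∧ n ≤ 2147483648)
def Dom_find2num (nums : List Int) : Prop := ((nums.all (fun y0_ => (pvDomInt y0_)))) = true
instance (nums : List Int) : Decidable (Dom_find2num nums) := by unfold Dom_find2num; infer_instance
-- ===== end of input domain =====

-- B changes the decomposition: two directed early-exit scans instead of A's single combined pass (objective: alternative).

-- ===== PORT A =====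
-- single pass over range(0, len-1), carrying (xi, yi); indices are always in range, so pyGetD's default is never used
def find2num (nums : List Int) : List Int :=
  let p := (PySem.List.pyRange 0 ((nums.length : Int) - 1) 1).foldl
    (fun (st : Int × Int) i =>
      if PySem.List.pyGetD nums i 0 > PySem.List.pyGetD nums (i + 1) 0 then
        ((if st.1 = -1 then i else st.1), i + 1)
      else st) (-1, -1)
  [p.1, p.2]

-- ===== PORT B =====
-- forward scan: first i with nums[i] > nums[i+1], else -1
def bFirst (nums : List Int) (i : Nat) : Int :=
  if h : i + 1 < nums.length then
    (if nums[i] > nums[i + 1] then (i : Int) else bFirst nums (i + 1))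
  else -1
termination_by nums.length - i

-- backward scan, i = k-1, k-2, …, 0: first (largest) i with nums[i] > nums[i+1], return i+1, else -1
-- (indices are always in range at the call site, so getD's default is never used)
def bLast (nums : List Int) : Nat → Int
  | 0 => -1
  | k + 1 => if nums.getD k 0 > nums.getD (k + 1) 0 then (k : Int) + 1 else bLast nums k

def find2num_alt (nums : List Int) : List Int :=
  [bFirst nums 0, bLast nums (nums.length - 1)]

-- ===== PRECONDITION & SPEC =====
def Spec_find2num (nums : List Int) (out : List Int) : Prop := out = find2num_alt nums
instance (nums : List Int) (out : List Int) : Decidable (Spec_find2num nums out) := by unfold Spec_find2num; infer_instance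

-- ===== CLAIM (what is proved, stated in full; the proofs are below) =====
def Claim_equal_find2num : Prop := ∀ (nums : List Int), Dom_find2num nums → Spec_find2num nums (find2num nums)

-- ===== LEMMAS AND PROOFS =====

-- the adjacent-inversion test at index k (totalized exactly as the ports totalize it)
def inv (nums : List Int) (k : Nat) : Bool := nums.getD k 0 > nums.getD (k + 1) 0

-- xi of A's fold after processing indices [0, m)
def cFirst (nums : List Int) : Nat → Int
  | 0 => -1
  | m + 1 => if inv nums m then (if cFirst nums m = -1 then (m : Int) else cFirst nums m) else cFirst nums m

-- forward find-first on [i, m)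
def dFirst (nums : List Int) (i m : Nat) : Int :=
  if _h : i < m then (if inv nums i then (i : Int) else dFirst nums (i + 1) m) else -1
termination_by m - i

theorem dFirst_stop (nums : List Int) (i m : Nat) (h : m ≤ i) : dFirst nums i m = -1 := by
  rw [dFirst]; simp [show ¬ i < m by omega]

theorem dFirst_succ_right (nums : List Int) (i m : Nat) (h : i ≤ m) :
    dFirst nums i (m + 1) =
      if dFirst nums i m = -1 then (if inv nums m then (m : Int) else -1) else dFirst nums i m := by
  induction hm : m - i generalizing i with
  | zero =>
    have hi : i = m := by omega
    subst hi
    rw [dFirst]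
    simp [dFirst_stop nums (i + 1) (i + 1) (le_refl _), dFirst_stop nums i i (le_refl _)]
  | succ n ih =>
    have hi : i < m := by omega
    have hlhs : dFirst nums i (m + 1) =
        if inv nums i then (i : Int) else dFirst nums (i + 1) (m + 1) := by
      rw [dFirst]; simp [Nat.lt_succ_of_lt hi]
    have hmid : dFirst nums i m = if inv nums i then (i : Int) else dFirst nums (i + 1) m := by
      rw [dFirst]; simp [hi]
    by_cases hinv : inv nums i
    · rw [hlhs, hmid]
      have hni : (i : Int) ≠ -1 := by omega
      simp [hinv, hni]
    · rw [hlhs, hmid]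
      simp only [hinv, if_false, Bool.false_eq_true]
      exact ih (i + 1) (by omega) (by omega)

theorem cFirst_eq_dFirst (nums : List Int) (m : Nat) : cFirst nums m = dFirst nums 0 m := by
  induction m with
  | zero => rw [cFirst, dFirst]; simp
  | succ m ih =>
    rw [cFirst, dFirst_succ_right nums 0 m (Nat.zero_le m), ← ih]
    by_cases hinv : inv nums m <;> by_cases hc : cFirst nums m = -1 <;> simp [hinv, hc]

theorem bFirst_eq_dFirst (nums : List Int) (i : Nat) :
    bFirst nums i = dFirst nums i (nums.length - 1) := by
  induction hm : nums.length - 1 - i generalizing i with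
  | zero =>
    rw [bFirst, dFirst]
    have h1 : ¬ (i + 1 < nums.length) := by omega
    have h2 : ¬ (i < nums.length - 1) := by omega
    simp [h1, h2]
  | succ n ih =>
    rw [bFirst, dFirst]
    have h1 : i + 1 < nums.length := by omega
    have h2 : i < nums.length - 1 := by omega
    have hg1 : nums.getD i 0 = nums[i] := List.getD_eq_getElem nums 0 (by omega)
    have hg2 : nums.getD (i + 1) 0 = nums[i + 1] := List.getD_eq_getElem nums 0 h1
    simp only [h1, h2, dite_true, inv, hg1, hg2]
    by_cases hinv : nums[i] > nums[i + 1]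
    · simp [hinv]
    · simp only [hinv, decide_false, if_false]
      exact ih (i + 1) (by omega)

-- the fold of A over indices [0, m) computes (cFirst m, bLast m)
theorem foldA_eq (nums : List Int) (m : Nat) :
    (PySem.List.pyRange 0 (m : Int) 1).foldl
      (fun (st : Int × Int) i =>
        if PySem.List.pyGetD nums i 0 > PySem.List.pyGetD nums (i + 1) 0 then
          ((if st.1 = -1 then i else st.1), i + 1)
        else st) (-1, -1) = (cFirst nums m, bLast nums m) := by
  induction m with
  | zero => simp [PySem.List.pyRange_one_eq_nil, cFirst, bLast]
  | succ m ih =>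
    have hsplit : PySem.List.pyRange 0 ((m : Int) + 1) 1 =
        PySem.List.pyRange 0 (m : Int) 1 ++ [(m : Int)] :=
      PySem.List.pyRange_one_succ_right (by positivity)
    have hcast : ((m + 1 : Nat) : Int) = (m : Int) + 1 := by push_cast; ring
    rw [hcast, hsplit, List.foldl_append, ih]
    simp only [List.foldl_cons, List.foldl_nil]
    have hg1 : PySem.List.pyGetD nums (m : Int) 0 = nums.getD m 0 := PySem.List.pyGetD_natCast ..
    have hg2 : PySem.List.pyGetD nums ((m : Int) + 1) 0 = nums.getD (m + 1) 0 := by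
      rw [show ((m : Int) + 1) = ((m + 1 : Nat) : Int) by push_cast; ring]
      exact PySem.List.pyGetD_natCast ..
    rw [cFirst, bLast]
    simp only [inv, hg1, hg2, List.getD_eq_getElem?_getD, gt_iff_lt, decide_eq_true_eq]
    split_ifs <;> simp_all

-- ===== VERDICT (by name: the statement is the Claim_ definition above) =====
theorem find2num_spec : Claim_equal_find2num := by
  intro nums _
  unfold Spec_find2num find2num find2num_alt
  rcases nums with _ | ⟨a, t⟩
  · rw [bFirst]
    simp [bLast]
  · have h : (((a :: t).length : Int) - 1) = (((a :: t).length - 1 : Nat) : Int) := by simp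
    simp only [h, foldA_eq, bFirst_eq_dFirst, cFirst_eq_dFirst]
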